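-- pv_equiv track=rewrite | github.com/Bradpalubicki/Legal-AI-system-dev | backend/app/src/core/unified_system.py | _parse_defenses
-- ===== SOURCE A (Python) =====
-- from typing import Dict, List, Optional, Any
--
-- def _parse_defenses(response: str) -> List[Dict]:
--     """Parse defense list from response"""
--     defenses = []
--     lines = response.split('\n')
--
--     current_defense = {}
--     for line in lines:
--         if line.strip().startswith(('1.', '2.', '3.', '4.', '5.')):
--             if current_defense:
--                 defenses.append(current_defense)
--             current_defense = {'name': line.split('.', 1)[1].strip()}
--         elif ':' in line and current_defense:
--             key, value = line.split(':', 1)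
--             current_defense[key.strip().lower().replace(' ', '_')] = value.strip()
--
--     if current_defense:
--         defenses.append(current_defense)
--
--     return defenses
-- ===== SOURCE B (Python) =====
-- def _parse_defenses(response: str):
--     lines = response.split('\n')
--     # first pass: cut lines into blocks, one per numbered header; drop pre-header lines
--     blocks = []
--     for line in lines:
--         if line.strip().startswith(('1.', '2.', '3.', '4.', '5.')):
--             blocks.append([line])
--         elif blocks:
--             blocks[-1].append(line)
--     # second pass: parse each block independently
--     result = []
--     for block in blocks:
--         header, *rest = block
--         d = {'name': header.split('.', 1)[1].strip()}
--         for line in rest: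
--             if ':' in line:
--                 key, value = line.split(':', 1)
--                 d[key.strip().lower().replace(' ', '_')] = value.strip()
--         result.append(d)
--     return result
-- ===== Notes on version B (the rewrite author's own statement) =====
-- stated objective: alternative
-- what changed: Replaced the interleaved state-machine (current dict mutated while scanning) by a two-pass pipeline: first group lines into per-header blocks, then parse each block into its dict independently.
import Mathlib
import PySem

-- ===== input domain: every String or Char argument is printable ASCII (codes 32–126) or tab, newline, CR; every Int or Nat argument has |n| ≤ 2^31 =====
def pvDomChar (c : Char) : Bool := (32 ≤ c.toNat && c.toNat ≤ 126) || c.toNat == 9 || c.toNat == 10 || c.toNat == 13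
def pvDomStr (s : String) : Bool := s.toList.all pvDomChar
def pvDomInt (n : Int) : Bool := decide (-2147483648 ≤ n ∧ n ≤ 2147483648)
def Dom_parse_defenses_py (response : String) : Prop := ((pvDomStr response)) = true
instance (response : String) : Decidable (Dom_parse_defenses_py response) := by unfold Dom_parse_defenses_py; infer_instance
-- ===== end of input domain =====

-- B replaces A's single-pass state machine by a group-into-blocks pass followed by a
-- per-block parsing pass (alternative decomposition, same cost).

-- shared helpers: both Pythons use these identical inline expressions
def pdIsHeader (line : String) : Bool :=
  let s := PySem.Str.strip line
  PySem.Str.startswith s "1." || PySem.Str.startswith s "2." ||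
  PySem.Str.startswith s "3." || PySem.Str.startswith s "4." ||
  PySem.Str.startswith s "5."

-- line.split('.', 1)[1].strip()  (index 1 exists whenever pdIsHeader holds)
def pdNameOf (line : String) : String :=
  PySem.Str.strip (((PySem.Str.splitMax? line "." 1).getD []).getD 1 "")

def pdNormKey (k : String) : String :=
  PySem.Str.replace (PySem.Str.lower (PySem.Str.strip k)) " " "_"

-- ===== PORT A =====
def pdA_step (st : List (PySem.Dict String String) × PySem.Dict String String)
    (line : String) : List (PySem.Dict String String) × PySem.Dict String String :=
  if pdIsHeader line then
    ((if st.2.items.isEmpty then st.1 else st.1 ++ [st.2]),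
     (PySem.Dict.empty).insert "name" (pdNameOf line))
  else if PySem.Str.isIn ":" line && !st.2.items.isEmpty then
    let parts := (PySem.Str.splitMax? line ":" 1).getD []
    (st.1, st.2.insert (pdNormKey (parts.getD 0 "")) (PySem.Str.strip (parts.getD 1 "")))
  else st

-- final 'if current_defense: defenses.append(current_defense)'
def pdA_final (st : List (PySem.Dict String String) × PySem.Dict String String) :
    List (PySem.Dict String String) :=
  if st.2.items.isEmpty then st.1 else st.1 ++ [st.2]

def parse_defenses_py (response : String) : List (List (String × String)) :=
  let lines := (PySem.Str.split? response "\n").getD []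
  (pdA_final (lines.foldl pdA_step ([], PySem.Dict.empty))).map (fun d => d.items)

-- ===== PORT B =====
-- first pass: blocks.append([line]) on a header, else blocks[-1].append(line)
def pdB_blockStep (blocks : List (List String)) (line : String) : List (List String) :=
  if pdIsHeader line then blocks ++ [[line]]
  else if blocks.isEmpty then blocks
  else blocks.dropLast ++ [blocks.getLastD [] ++ [line]]

def pdKVStep (d : PySem.Dict String String) (line : String) : PySem.Dict String String :=
  if PySem.Str.isIn ":" line then
    let parts := (PySem.Str.splitMax? line ":" 1).getD []
    d.insert (pdNormKey (parts.getD 0 "")) (PySem.Str.strip (parts.getD 1 ""))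
  else d

def pdParseBlock (block : List String) : PySem.Dict String String :=
  match block with
  | [] => PySem.Dict.empty   -- unreachable: every block starts with its header line
  | h :: rest => rest.foldl pdKVStep ((PySem.Dict.empty).insert "name" (pdNameOf h))

def parse_defenses_py_alt (response : String) : List (List (String × String)) :=
  ((((PySem.Str.split? response "\n").getD []).foldl pdB_blockStep []).map
    (fun b => (pdParseBlock b).items))

-- ===== PRECONDITION & SPEC =====
def Spec_parse_defenses_py (response : String) (out : List (List (String × String))) : Prop := out = parse_defenses_py_alt response
instance (response : String) (out : List (List (String × String))) : Decidable (Spec_parse_defenses_py response out) := by unfold Spec_parse_defenses_py; infer_instance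

-- ===== CLAIM (what is proved, stated in full; the proofs are below) =====
def Claim_equal_parse_defenses_py : Prop := ∀ (response : String), Dom_parse_defenses_py response → Spec_parse_defenses_py response (parse_defenses_py response)

-- ===== LEMMAS AND PROOFS =====

theorem pdKVStep_ne {d : PySem.Dict String String} (line : String)
    (h : d.items ≠ []) : (pdKVStep d line).items ≠ [] := by
  unfold pdKVStep
  split
  · simp [PySem.Dict.items_insert]
    split <;> simp_all
  · exact h

theorem foldl_pdKVStep_ne (ls : List String) (d : PySem.Dict String String)
    (h : d.items ≠ []) : (ls.foldl pdKVStep d).items ≠ [] := by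
  induction ls generalizing d with
  | nil => exact h
  | cons l ls ih => exact ih _ (pdKVStep_ne l h)

theorem pdParseBlock_ne (h : String) (rest : List String) :
    (pdParseBlock (h :: rest)).items ≠ [] := by
  unfold pdParseBlock
  exact foldl_pdKVStep_ne rest _ (by simp [PySem.Dict.items_insert])

theorem pdParseBlock_snoc (h : String) (rest : List String) (line : String) :
    pdParseBlock (h :: (rest ++ [line])) = pdKVStep (pdParseBlock (h :: rest)) line := by
  simp [pdParseBlock, List.foldl_append]

theorem pdParseBlock_single (l : String) :
    pdParseBlock [l] = (PySem.Dict.empty).insert "name" (pdNameOf l) := rfl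

theorem phase2 (lines : List String) : ∀ (bs : List (List String)) (h : String) (cur : List String),
    pdA_final (lines.foldl pdA_step (bs.map pdParseBlock, pdParseBlock (h :: cur)))
    = (lines.foldl pdB_blockStep (bs ++ [h :: cur])).map pdParseBlock := by
  induction lines with
  | nil =>
    intro bs h cur
    simp [pdA_final, List.isEmpty_iff, pdParseBlock_ne h cur]
  | cons l rest ih =>
    intro bs h cur
    have hne : (pdParseBlock (h :: cur)).items.isEmpty = false := by
      simp [pdParseBlock_ne h cur]
    simp only [List.foldl_cons]
    by_cases hl : pdIsHeader l = true
    · have hA : pdA_step (bs.map pdParseBlock, pdParseBlock (h :: cur)) l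
          = ((bs ++ [h :: cur]).map pdParseBlock, pdParseBlock [l]) := by
        simp [pdA_step, hl, hne, pdParseBlock_single]
      have hB : pdB_blockStep (bs ++ [h :: cur]) l = (bs ++ [h :: cur]) ++ [[l]] := by
        simp [pdB_blockStep, hl]
      rw [hA, hB]
      exact ih (bs ++ [h :: cur]) l []
    · have hB : pdB_blockStep (bs ++ [h :: cur]) l = bs ++ [h :: (cur ++ [l])] := by
        simp [pdB_blockStep, hl]
      by_cases hc : PySem.Chars.isIn [':'] l.toList = true
      · have hA : pdA_step (bs.map pdParseBlock, pdParseBlock (h :: cur)) l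
            = (bs.map pdParseBlock, pdParseBlock (h :: (cur ++ [l]))) := by
          simp [pdA_step, hl, hc, hne, pdParseBlock_snoc, pdKVStep]
        rw [hA, hB]
        exact ih bs h (cur ++ [l])
      · have hA : pdA_step (bs.map pdParseBlock, pdParseBlock (h :: cur)) l
            = (bs.map pdParseBlock, pdParseBlock (h :: cur)) := by
          simp [pdA_step, hl, hc]
        have hskip : pdParseBlock (h :: (cur ++ [l])) = pdParseBlock (h :: cur) := by
          rw [pdParseBlock_snoc]
          simp [pdKVStep, hc]
        rw [hA, hB, ← hskip]
        exact ih bs h (cur ++ [l])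

theorem phase0 (lines : List String) :
    pdA_final (lines.foldl pdA_step ([], PySem.Dict.empty))
    = (lines.foldl pdB_blockStep []).map pdParseBlock := by
  induction lines with
  | nil => simp [pdA_final, PySem.Dict.empty]
  | cons l rest ih =>
    simp only [List.foldl_cons]
    by_cases hl : pdIsHeader l = true
    · have hA : pdA_step ([], PySem.Dict.empty) l
          = (([] : List (List String)).map pdParseBlock, pdParseBlock [l]) := by
        simp [pdA_step, hl, PySem.Dict.empty, pdParseBlock_single]
      have hB : pdB_blockStep [] l = ([] : List (List String)) ++ [[l]] := by
        simp [pdB_blockStep, hl]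
      rw [hA, hB]
      exact phase2 rest [] l []
    · have hA : pdA_step ([], PySem.Dict.empty) l = ([], PySem.Dict.empty) := by
        simp [pdA_step, hl, PySem.Dict.empty]
      have hB : pdB_blockStep [] l = [] := by
        simp [pdB_blockStep, hl]
      rw [hA, hB]
      exact ih

-- ===== VERDICT (by name: the statement is the Claim_ definition above) =====
theorem parse_defenses_py_spec : Claim_equal_parse_defenses_py := by
  intro response _
  unfold Spec_parse_defenses_py parse_defenses_py parse_defenses_py_alt
  have := phase0 ((PySem.Str.split? response "\n").getD [])
  simp only at this ⊢
  rw [this, List.map_map]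
  rfl
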